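-- pv_equiv track=rewrite | github.com/JohannDickson/aoc2021 | bin/02.py | part1
-- ===== SOURCE A (Python) =====
-- def part1(instructions):
--     pos = {'x': 0, 'y': 0}
--     for i in instructions:
--         direction, distance = i.split(' ')
--         if direction == "forward":
--             pos['x'] += int(distance)
--         elif direction == "up":
--             pos['y'] -= int(distance)
--         elif direction == "down":
--             pos['y'] += int(distance)
--     return pos['x'] * pos['y']
-- ===== SOURCE B (Python) =====
-- def part1(instructions):
--     pairs = []
--     for line in instructions:
--         direction, distance = line.split(' ')
--         pairs.append((direction, distance))
--     horizontal = sum(int(s) for d, s in pairs if d == 'forward')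
--     depth = sum(int(s) for d, s in pairs if d == 'down') - sum(int(s) for d, s in pairs if d == 'up')
--     return horizontal * depth
-- ===== Notes on version B (the rewrite author's own statement) =====
-- stated objective: alternative
-- what changed: Replaced the single branching accumulation loop over a position dict with a parse pass producing (direction, distance) pairs followed by three filtered sums (forward; down minus up).
import Mathlib
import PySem

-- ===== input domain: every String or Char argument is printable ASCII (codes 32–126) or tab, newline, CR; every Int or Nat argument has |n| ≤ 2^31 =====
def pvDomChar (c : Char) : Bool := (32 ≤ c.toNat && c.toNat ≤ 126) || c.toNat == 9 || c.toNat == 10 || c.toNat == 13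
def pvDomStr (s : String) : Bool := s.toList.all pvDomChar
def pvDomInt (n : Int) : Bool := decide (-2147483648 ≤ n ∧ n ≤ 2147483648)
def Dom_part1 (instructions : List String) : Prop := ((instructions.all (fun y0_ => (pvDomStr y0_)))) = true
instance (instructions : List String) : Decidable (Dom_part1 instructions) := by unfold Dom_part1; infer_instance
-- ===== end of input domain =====

-- B replaces A's single branching accumulation loop with a parse pass plus three filtered sums (alternative decomposition, same cost).


-- ===== PORT A =====
-- i.split(' '): sep is the nonempty literal " ", so PySem.Str.split? always returns some here
def splitSp (i : String) : List String := (PySem.Str.split? i " ").getD []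

-- state is (pos['x'], pos['y']); none = a raised exception (excluded by Pre_)
def stepA (st : Option (Int × Int)) (i : String) : Option (Int × Int) :=
  match st with
  | none => none
  | some (x, y) =>
    match splitSp i with
    | [direction, distance] =>
      if direction = "forward" then (PySem.Int.ofStr? distance).map (fun d => (x + d, y))
      else if direction = "up" then (PySem.Int.ofStr? distance).map (fun d => (x, y - d))
      else if direction = "down" then (PySem.Int.ofStr? distance).map (fun d => (x, y + d))
      else some (x, y)
    | _ => none

def part1 (instructions : List String) : Int :=
  match instructions.foldl stepA (some (0, 0)) with
  | some (x, y) => x * y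
  | none => 0

-- ===== PORT B =====
def parseLine (i : String) : Option (String × String) :=
  match splitSp i with
  | [d, s] => some (d, s)
  | _ => none

def parseAll : List String → Option (List (String × String))
  | [] => some []
  | i :: rest =>
    match parseLine i, parseAll rest with
    | some p, some ps => some (p :: ps)
    | _, _ => none

def sumDir (dir : String) (pairs : List (String × String)) : Int :=
  ((pairs.filter (fun p => p.1 = dir)).map (fun p => (PySem.Int.ofStr? p.2).getD 0)).sum

def part1_alt (instructions : List String) : Int :=
  match parseAll instructions with
  | none => 0
  | some pairs =>
    sumDir "forward" pairs * (sumDir "down" pairs - sumDir "up" pairs)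

-- ===== PRECONDITION & SPEC =====
-- Pre_ excludes exactly the inputs on which A raises: a line that does not split on ' ' into
-- exactly two pieces (ValueError on unpacking), or a matching direction whose distance is not
-- a valid int literal (ValueError from int()).
def lineOKb (i : String) : Bool :=
  match splitSp i with
  | [d, s] => !(d == "forward" || d == "up" || d == "down") || (PySem.Int.ofStr? s).isSome
  | _ => false

def Pre_part1 (instructions : List String) : Prop := instructions.all lineOKb = true
instance (instructions : List String) : Decidable (Pre_part1 instructions) := by unfold Pre_part1; infer_instance

def pvWitness_part1 : List String := ["forward 3", "down 2", "up 1", "hover x"]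

def Spec_part1 (instructions : List String) (out : Int) : Prop := out = part1_alt instructions
instance (instructions : List String) (out : Int) : Decidable (Spec_part1 instructions out) := by unfold Spec_part1; infer_instance

-- ===== CLAIM (what is proved, stated in full; the proofs are below) =====
def Claim_equal_part1 : Prop := ∀ (instructions : List String), Dom_part1 instructions → Pre_part1 instructions → Spec_part1 instructions (part1 instructions)

-- ===== LEMMAS AND PROOFS =====
def lineToPair (i : String) : String × String :=
  match splitSp i with
  | [d, s] => (d, s)
  | _ => ("", "")

lemma parseAll_eq (l : List String) (h : l.all lineOKb = true) :
    parseAll l = some (l.map lineToPair) := by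
  induction l with
  | nil => rfl
  | cons i rest ih =>
    simp only [List.all_cons, Bool.and_eq_true] at h
    have hok := h.1
    have hline : parseLine i = some (lineToPair i) := by
      unfold lineOKb at hok
      unfold parseLine lineToPair
      cases hsp : splitSp i with
      | nil => rw [hsp] at hok; simp at hok
      | cons a t =>
        cases t with
        | nil => rw [hsp] at hok; simp at hok
        | cons b t2 =>
          cases t2 with
          | nil => rfl
          | cons c t3 => rw [hsp] at hok; simp at hok
    simp [parseAll, hline, ih h.2]

lemma sumDir_cons (dir d s : String) (ps : List (String × String)) :
    sumDir dir ((d, s) :: ps)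
      = (if d = dir then (PySem.Int.ofStr? s).getD 0 else 0) + sumDir dir ps := by
  by_cases hd : d = dir
  · simp [sumDir, hd]
  · simp [sumDir, hd]

lemma foldA_eq (l : List String) (h : l.all lineOKb = true) (x y : Int) :
    l.foldl stepA (some (x, y))
      = some (x + sumDir "forward" (l.map lineToPair),
              y + sumDir "down" (l.map lineToPair) - sumDir "up" (l.map lineToPair)) := by
  induction l generalizing x y with
  | nil => simp [sumDir]
  | cons i rest ih =>
    simp only [List.all_cons, Bool.and_eq_true] at h
    have hok := h.1
    unfold lineOKb at hok
    cases hsp : splitSp i with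
    | nil => rw [hsp] at hok; simp at hok
    | cons a t =>
      cases t with
      | nil => rw [hsp] at hok; simp at hok
      | cons b t2 =>
        cases t2 with
        | cons c t3 => rw [hsp] at hok; simp at hok
        | nil =>
          rw [hsp] at hok
          have hpair : lineToPair i = (a, b) := by unfold lineToPair; rw [hsp]
          simp only [List.foldl_cons, List.map_cons, hpair]
          by_cases hf : a = "forward"
          · have hv : (PySem.Int.ofStr? b).isSome := by
              simp [hf] at hok; exact hok
            obtain ⟨n, hn⟩ := Option.isSome_iff_exists.mp hv
            have hstep : stepA (some (x, y)) i = some (x + n, y) := by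
              simp [stepA, hsp, hf, hn]
            rw [hstep, ih h.2]
            rw [sumDir_cons, sumDir_cons, sumDir_cons]
            simp [hf, hn]
            ring_nf
          · by_cases hu : a = "up"
            · have hv : (PySem.Int.ofStr? b).isSome := by
                simp [hu] at hok; exact hok
              obtain ⟨n, hn⟩ := Option.isSome_iff_exists.mp hv
              have hstep : stepA (some (x, y)) i = some (x, y - n) := by
                simp [stepA, hsp, hu, hn]
              rw [hstep, ih h.2]
              rw [sumDir_cons, sumDir_cons, sumDir_cons]
              simp [hu, hn]
              ring_nf
            · by_cases hd : a = "down"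
              · have hv : (PySem.Int.ofStr? b).isSome := by
                  simp [hd] at hok; exact hok
                obtain ⟨n, hn⟩ := Option.isSome_iff_exists.mp hv
                have hstep : stepA (some (x, y)) i = some (x, y + n) := by
                  simp [stepA, hsp, hd, hn]
                rw [hstep, ih h.2]
                rw [sumDir_cons, sumDir_cons, sumDir_cons]
                simp [hd, hn]
                ring_nf
              · have hstep : stepA (some (x, y)) i = some (x, y) := by
                  simp [stepA, hsp, hf, hu, hd]
                rw [hstep, ih h.2]
                rw [sumDir_cons, sumDir_cons, sumDir_cons]
                simp [hf, hu, hd]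

-- ===== VERDICT (by name: the statement is the Claim_ definition above) =====
theorem part1_spec : Claim_equal_part1 := by
  intro instructions _ hpre
  unfold Spec_part1 part1 part1_alt
  rw [foldA_eq instructions hpre 0 0, parseAll_eq instructions hpre]
  simp
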